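-- pv_equiv track=rewrite | github.com/CSivira/test2 | pregunta3/main.py | asc_list
-- ===== SOURCE A (Python) =====
-- def asc_list(l: [int]):
--     if len(l) == 0:
--         yield []
--
--     yield []
--     for i in range(len(l)):
--         h = l[i]
--         t = l[i + 1:]
--         yield [h]
--         for sub in asc_list(t):
--             if len(sub) != 0 and sub[0] > h:
--                 yield [h] + sub
-- ===== SOURCE B (Python) =====
-- def asc_list(l):
--     # Build ascending runs directly: gen(h, rest) extends h only with
--     # strictly larger elements, so no generate-then-filter pass is needed.
--     def gen(h, rest):
--         yield [h]
--         for k in range(len(rest)):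
--             if rest[k] > h:
--                 for s in gen(rest[k], rest[k + 1:]):
--                     yield [h] + s
--     if len(l) == 0:
--         yield []
--     yield []
--     for i in range(len(l)):
--         yield from gen(l[i], l[i + 1:])
-- ===== Notes on version B (the rewrite author's own statement) =====
-- stated objective: simpler
-- what changed: A recursively generates all ascending subsequences of each tail and then filters them by head > h; B builds only the valid extensions directly with a threshold-passing helper gen(h, rest), eliminating the filter pass.
import Mathlib
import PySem

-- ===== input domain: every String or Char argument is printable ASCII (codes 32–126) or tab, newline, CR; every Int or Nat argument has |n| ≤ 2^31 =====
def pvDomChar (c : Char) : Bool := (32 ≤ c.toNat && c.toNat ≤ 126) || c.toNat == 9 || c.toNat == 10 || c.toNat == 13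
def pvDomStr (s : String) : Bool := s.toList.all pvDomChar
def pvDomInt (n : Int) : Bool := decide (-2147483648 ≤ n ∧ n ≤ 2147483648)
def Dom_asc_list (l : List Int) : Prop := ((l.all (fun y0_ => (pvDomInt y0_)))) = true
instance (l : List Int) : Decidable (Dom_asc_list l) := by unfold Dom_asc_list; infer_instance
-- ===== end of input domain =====

-- B replaces A's generate-then-filter recursion on tails by a direct threshold-passing
-- helper gen(h, rest) that only builds valid extensions; same yield order, no filter pass.
-- Both Pythons are generators; the ports return the list of yielded values in order.

-- ===== PORT A =====
-- the filter 'len(sub) != 0 and sub[0] > h' (short-circuit: headD only read when nonempty)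
def ascP (h : Int) (sub : List Int) : Bool := !(sub.length == 0) && decide (sub.headD 0 > h)

mutual
-- A's body: the two possible '[]' yields, then the for-loop over i (h = l[i], t = l[i+1:]),
-- realised as recursion over the suffixes of l
def asc_list (l : List Int) : List (List Int) :=
  (if l.length = 0 then [[]] else []) ++ [[]] ++ ascGo l
termination_by (l.length, 1)

-- one iteration: yield [h]; for sub in asc_list(t): if filter: yield [h] + sub; then next i
def ascGo : List Int → List (List Int)
  | [] => []
  | h :: t =>
      ([h] :: ((asc_list t).filter (ascP h)).map (fun sub => h :: sub)) ++ ascGo t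
termination_by l => (l.length, 0)
end

-- ===== PORT B =====
mutual
-- gen(h, rest): yield [h]; then the for-k loop (genLoop) over rest
def genB (h : Int) (rest : List Int) : List (List Int) :=
  [h] :: genLoop h rest
termination_by (rest.length, 1)

-- 'for k in range(len(rest)): if rest[k] > h: for s in gen(rest[k], rest[k+1:]): yield [h]+s'
def genLoop (h : Int) : List Int → List (List Int)
  | [] => []
  | x :: r => (if x > h then (genB x r).map (fun s => h :: s) else []) ++ genLoop h r
termination_by l => (l.length, 0)
end

-- top-level 'for i in range(len(l)): yield from gen(l[i], l[i+1:])'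
def altTop : List Int → List (List Int)
  | [] => []
  | x :: r => genB x r ++ altTop r

def asc_list_alt (l : List Int) : List (List Int) :=
  (if l.length = 0 then [[]] else []) ++ [[]] ++ altTop l

-- ===== PRECONDITION & SPEC =====
def Spec_asc_list (l : List Int) (out : List (List Int)) : Prop := out = asc_list_alt l
instance (l : List Int) (out : List (List Int)) : Decidable (Spec_asc_list l out) := by unfold Spec_asc_list; infer_instance

-- ===== CLAIM (what is proved, stated in full; the proofs are below) =====
def Claim_equal_asc_list : Prop := ∀ (l : List Int), Dom_asc_list l → Spec_asc_list l (asc_list l)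

-- ===== LEMMAS AND PROOFS =====

-- A's filter ignores the leading empty yields of the recursive call
theorem filter_asc_list (h : Int) (r : List Int) :
    (asc_list r).filter (ascP h) = (ascGo r).filter (ascP h) := by
  rw [asc_list]
  simp [ascP]

-- a block headed by x survives A's filter for threshold h iff x > h (all in one go)
theorem filter_ascP_block (h x : Int) (L : List (List Int)) :
    List.filter (ascP h) ([x] :: L.map (fun s => x :: s)) =
      if x > h then [x] :: L.map (fun s => x :: s) else [] := by
  by_cases hx : x > h <;>
    simp [List.filter_cons, List.filter_map, Function.comp_def, ascP, hx]

-- main invariant: A's filtered-and-prefixed block over a tail equals B's genLoop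
theorem ascGo_filter_eq_genLoop (t : List Int) (h : Int) :
    ((ascGo t).filter (ascP h)).map (fun sub => h :: sub) = genLoop h t := by
  induction t generalizing h with
  | nil => simp [ascGo, genLoop]
  | cons x r ih =>
      rw [ascGo, genLoop, List.filter_append, List.map_append, ih h]
      congr 1
      rw [filter_asc_list x r, filter_ascP_block h x, genB, ← ih x]
      by_cases hx : x > h <;> simp [hx]

theorem ascGo_eq_altTop (l : List Int) : ascGo l = altTop l := by
  induction l with
  | nil => simp [ascGo, altTop]
  | cons x r ih =>
      rw [ascGo, altTop, genB, ih]
      rw [filter_asc_list x r, ascGo_filter_eq_genLoop r x]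

-- ===== VERDICT (by name: the statement is the Claim_ definition above) =====
theorem asc_list_spec : Claim_equal_asc_list := by
  intro l _
  unfold Spec_asc_list
  rw [asc_list, asc_list_alt, ascGo_eq_altTop]
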